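-- pv_equiv track=rewrite | github.com/YTY101/AEye | hand.py | split_movement
-- ===== SOURCE A (Python) =====
-- def split_movement(dx, dy):
--     step = 10
--     """将超过 ±127 的移动分成多个小步"""
--     steps = []
--     while dx != 0 or dy != 0:
--         step_dx = max(-step, min(step, dx))
--         step_dy = max(-step, min(step, dy))
--         steps.append((step_dx, step_dy))
--         dx -= step_dx
--         dy -= step_dy
--     return steps
-- ===== SOURCE B (Python) =====
-- def split_movement(dx, dy):
--     def axis(d):
--         out = []
--         while d != 0:
--             s = max(-10, min(10, d))
--             out.append(s)
--             d -= s
--         return out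
--     xs, ys = axis(dx), axis(dy)
--     n = max(len(xs), len(ys))
--     xs += [0] * (n - len(xs))
--     ys += [0] * (n - len(ys))
--     return list(zip(xs, ys))
-- ===== Notes on version B (the rewrite author's own statement) =====
-- stated objective: alternative
-- what changed: Replaces A's single interleaved two-axis loop by two independent single-axis step generators whose lists are zero-padded to equal length and zipped into pairs.
import Mathlib
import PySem

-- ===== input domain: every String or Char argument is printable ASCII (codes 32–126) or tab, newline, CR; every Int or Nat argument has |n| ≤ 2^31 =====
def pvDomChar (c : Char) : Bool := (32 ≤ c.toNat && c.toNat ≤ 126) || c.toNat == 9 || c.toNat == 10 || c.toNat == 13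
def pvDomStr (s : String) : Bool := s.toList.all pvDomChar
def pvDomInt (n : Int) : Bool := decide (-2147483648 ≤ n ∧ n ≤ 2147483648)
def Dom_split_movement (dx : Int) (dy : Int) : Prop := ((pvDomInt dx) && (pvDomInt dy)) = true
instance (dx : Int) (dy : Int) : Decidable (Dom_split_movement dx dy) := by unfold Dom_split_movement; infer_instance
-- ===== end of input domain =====

-- B replaces A's interleaved two-axis loop by two per-axis step lists, zero-padded and zipped (alternative decomposition, same cost).


-- ===== PORT A =====
-- literal port of A's while loop: clamp both axes, append the pair, subtract, repeat
def split_movement (dx : Int) (dy : Int) : List (Int × Int) :=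
  if dx = 0 ∧ dy = 0 then []
  else
    let step_dx := max (-10) (min 10 dx)
    let step_dy := max (-10) (min 10 dy)
    (step_dx, step_dy) :: split_movement (dx - step_dx) (dy - step_dy)
termination_by dx.natAbs + dy.natAbs
decreasing_by
  simp only [Int.max_def, Int.min_def]
  split_ifs <;> omega

-- ===== PORT B =====
-- helper `axis` of Source B: single-axis step list
def pvAxis (d : Int) : List Int :=
  if d = 0 then []
  else
    let s := max (-10) (min 10 d)
    s :: pvAxis (d - s)
termination_by d.natAbs
decreasing_by
  simp only [Int.max_def, Int.min_def]
  split_ifs <;> omega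

def split_movement_alt (dx : Int) (dy : Int) : List (Int × Int) :=
  let xs := pvAxis dx
  let ys := pvAxis dy
  let n := max xs.length ys.length
  let xs' := xs ++ List.replicate (n - xs.length) 0
  let ys' := ys ++ List.replicate (n - ys.length) 0
  xs'.zip ys'

-- ===== PRECONDITION & SPEC =====
def Spec_split_movement (dx : Int) (dy : Int) (out : List (Int × Int)) : Prop := out = split_movement_alt dx dy
instance (dx : Int) (dy : Int) (out : List (Int × Int)) : Decidable (Spec_split_movement dx dy out) := by unfold Spec_split_movement; infer_instance

-- ===== CLAIM (what is proved, stated in full; the proofs are below) =====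
def Claim_equal_split_movement : Prop := ∀ (dx : Int) (dy : Int), Dom_split_movement dx dy → Spec_split_movement dx dy (split_movement dx dy)

-- ===== LEMMAS AND PROOFS =====

-- proof-only helper: zip-with-zero-padding, recursively
def pvZL : List Int → List Int → List (Int × Int)
  | [], [] => []
  | [], y :: ys => (0, y) :: pvZL [] ys
  | x :: xs, [] => (x, 0) :: pvZL xs []
  | x :: xs, y :: ys => (x, y) :: pvZL xs ys

theorem pvZL_eq_pad (xs ys : List Int) :
    (xs ++ List.replicate (max xs.length ys.length - xs.length) 0).zip
      (ys ++ List.replicate (max xs.length ys.length - ys.length) 0) = pvZL xs ys := by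
  induction xs generalizing ys with
  | nil =>
    induction ys with
    | nil => simp [pvZL]
    | cons y ys ih =>
      simpa [pvZL, List.replicate_succ] using ih
  | cons x xs ih =>
    cases ys with
    | nil =>
      have h : ∀ zs : List Int,
          (zs ++ List.replicate (max zs.length 0 - zs.length) 0).zip
            (([] : List Int) ++ List.replicate (max zs.length 0 - 0) 0) = pvZL zs [] := by
        intro zs
        induction zs with
        | nil => simp [pvZL]
        | cons z zs ih2 => simpa [pvZL, List.replicate_succ] using ih2
      exact h (x :: xs)
    | cons y ys =>
      have := ih ys
      simpa [pvZL, List.length_cons, Nat.succ_max_succ] using this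

theorem pvAxis_zero : pvAxis 0 = [] := by
  rw [pvAxis]; simp

theorem pvAxis_ne (d : Int) (h : d ≠ 0) :
    pvAxis d = max (-10) (min 10 d) :: pvAxis (d - max (-10) (min 10 d)) := by
  rw [pvAxis]; simp [h]

theorem split_eq_zl (n : ℕ) : ∀ dx dy : Int, dx.natAbs + dy.natAbs ≤ n →
    split_movement dx dy = pvZL (pvAxis dx) (pvAxis dy) := by
  induction n with
  | zero =>
    intro dx dy h
    have hx : dx = 0 := by omega
    have hy : dy = 0 := by omega
    subst hx; subst hy
    rw [split_movement]; simp [pvAxis_zero, pvZL]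
  | succ n ih =>
    intro dx dy h
    have h10 : max (-10 : Int) (min 10 (0:Int)) = 0 := by decide
    by_cases hx : dx = 0 <;> by_cases hy : dy = 0
    · subst hx; subst hy
      rw [split_movement]; simp [pvAxis_zero, pvZL]
    · subst hx
      have hrec := ih 0 (dy - max (-10) (min 10 dy)) (by
        simp only [Int.max_def, Int.min_def] at *
        split_ifs <;> omega)
      simp only [pvAxis_zero] at hrec
      rw [split_movement, pvAxis_zero, pvAxis_ne dy hy]
      simp [hy, hrec, pvZL]
    · subst hy
      have hrec := ih (dx - max (-10) (min 10 dx)) 0 (by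
        simp only [Int.max_def, Int.min_def] at *
        split_ifs <;> omega)
      simp only [pvAxis_zero] at hrec
      rw [split_movement, pvAxis_zero, pvAxis_ne dx hx]
      simp [hx, hrec, pvZL]
    · have hrec := ih (dx - max (-10) (min 10 dx)) (dy - max (-10) (min 10 dy)) (by
        simp only [Int.max_def, Int.min_def] at *
        split_ifs <;> omega)
      rw [split_movement, pvAxis_ne dx hx, pvAxis_ne dy hy]
      simp [hx, hrec, pvZL]

-- ===== VERDICT (by name: the statement is the Claim_ definition above) =====
theorem split_movement_spec : Claim_equal_split_movement := by
  intro dx dy _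
  unfold Spec_split_movement split_movement_alt
  rw [pvZL_eq_pad, split_eq_zl (dx.natAbs + dy.natAbs) dx dy le_rfl]
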